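-- pv_equiv track=rewrite | github.com/Mika135/minerlsd_simplicial | MinerLSD_gudhi.py | kronecker_delta
-- ===== SOURCE A (Python) =====
-- def kronecker_delta(components):
--     """
--     Check if all lists within a list are identical, disregarding the order of elements within the lists.
--
--     Parameters:
--     lists (list of lists of ints): The list containing sublists to be checked.
--
--     Returns:
--     bool: True if all sublists are identical, False otherwise.
--     """
--     if not components:
--         return True  # If the list is empty, consider it as identical by definition
--
--     first_l = components[0]
--     for l in components:
--         # Disregarding the order by using set()
--         if set(l) != set(first_l):
--             return False
--     return True
-- ===== SOURCE B (Python) =====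
-- def kronecker_delta(components):
--     """True iff all sublists are equal as sets (True for empty input).
--
--     Different algorithm: all sets are equal iff the union of all of them
--     equals the intersection of all of them (each set lies between the
--     intersection and the union). One pass maintains both accumulators.
--     """
--     union = set()
--     inter = None
--     for l in components:
--         s = set(l)
--         union |= s
--         inter = s if inter is None else inter & s
--     return inter is None or union == inter
-- ===== Notes on version B (the rewrite author's own statement) =====
-- stated objective: alternative
-- what changed: Instead of comparing each sublist's set against the first sublist's set with an early-exit loop, B folds over the sublists maintaining the running union and running intersection of their element-sets and returns whether union equals intersection (all sets are equal iff their union equals their intersection; empty input leaves the intersection undefined and yields True).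
import Mathlib
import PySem

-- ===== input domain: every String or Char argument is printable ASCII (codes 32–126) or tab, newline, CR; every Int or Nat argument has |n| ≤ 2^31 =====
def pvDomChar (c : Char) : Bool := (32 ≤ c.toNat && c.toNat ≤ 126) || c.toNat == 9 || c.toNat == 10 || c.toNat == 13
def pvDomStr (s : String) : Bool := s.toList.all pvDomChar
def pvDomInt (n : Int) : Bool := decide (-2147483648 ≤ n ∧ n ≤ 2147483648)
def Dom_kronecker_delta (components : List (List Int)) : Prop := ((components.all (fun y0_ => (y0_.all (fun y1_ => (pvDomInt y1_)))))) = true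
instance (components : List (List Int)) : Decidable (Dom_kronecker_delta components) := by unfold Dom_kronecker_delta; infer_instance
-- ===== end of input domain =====

-- B replaces A's compare-each-against-the-first loop by a fold maintaining the running union and
-- running intersection of all element-sets and testing union == intersection (objective: alternative).


-- ===== PORT A =====
-- the `for l in components: if set(l) != set(first_l): return False` loop
def kronecker_delta_loop (first : List Int) : List (List Int) → Bool
  | [] => true
  | l :: rest =>
      if !(PySem.Set.equal (PySem.Set.ofList l) (PySem.Set.ofList first)) then false
      else kronecker_delta_loop first rest

def kronecker_delta (components : List (List Int)) : Bool :=
  match components with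
  | [] => true
  | first :: _ => kronecker_delta_loop first components

-- ===== PORT B =====
-- one loop step: s = set(l); union |= s; inter = s if inter is None else inter & s
def kd_step (st : PySem.Set Int × Option (PySem.Set Int)) (l : List Int) :
    PySem.Set Int × Option (PySem.Set Int) :=
  let s := PySem.Set.ofList l
  (PySem.Set.union st.1 s,
   match st.2 with
   | none => some s
   | some i => some (PySem.Set.inter i s))

def kronecker_delta_alt (components : List (List Int)) : Bool :=
  let st := components.foldl kd_step (PySem.Set.empty, none)
  match st.2 with
  | none => true
  | some i => PySem.Set.equal st.1 i

-- ===== PRECONDITION & SPEC =====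
def Spec_kronecker_delta (components : List (List Int)) (out : Bool) : Prop := out = kronecker_delta_alt components
instance (components : List (List Int)) (out : Bool) : Decidable (Spec_kronecker_delta components out) := by unfold Spec_kronecker_delta; infer_instance

-- ===== CLAIM =====
def Claim_equal_kronecker_delta : Prop := ∀ (components : List (List Int)), Dom_kronecker_delta components → Spec_kronecker_delta components (kronecker_delta components)

-- ===== LEMMAS AND PROOFS =====

theorem loop_eq_all (first : List Int) (xs : List (List Int)) :
    kronecker_delta_loop first xs
      = xs.all (fun l => PySem.Set.equal (PySem.Set.ofList l) (PySem.Set.ofList first)) := by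
  induction xs with
  | nil => rfl
  | cons l rest ih =>
    simp only [kronecker_delta_loop, List.all_cons]
    cases h : PySem.Set.equal (PySem.Set.ofList l) (PySem.Set.ofList first) <;> simp [ih]

-- invariant of B's fold once the intersection accumulator has been seeded
theorem kd_fold_inv (xs : List (List Int)) (u i : PySem.Set Int) :
    ∃ u' i', xs.foldl kd_step (u, some i) = (u', some i')
      ∧ (∀ x, x ∈ u' ↔ x ∈ u ∨ ∃ l ∈ xs, x ∈ l)
      ∧ (∀ x, x ∈ i' ↔ x ∈ i ∧ ∀ l ∈ xs, x ∈ l) := by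
  induction xs generalizing u i with
  | nil => exact ⟨u, i, rfl, by simp, by simp⟩
  | cons l rest ih =>
    obtain ⟨u', i', heq, hu, hi⟩ :=
      ih (PySem.Set.union u (PySem.Set.ofList l)) (PySem.Set.inter i (PySem.Set.ofList l))
    refine ⟨u', i', ?_, ?_, ?_⟩
    · simpa [kd_step] using heq
    · intro x
      rw [hu x]
      simp [PySem.Set.mem_union, PySem.Set.mem_ofList]
      tauto
    · intro x
      rw [hi x]
      simp [PySem.Set.mem_inter, PySem.Set.mem_ofList]
      tauto

-- ===== VERDICT =====
theorem kronecker_delta_spec : Claim_equal_kronecker_delta := by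
  intro components _
  unfold Spec_kronecker_delta
  match components with
  | [] => rfl
  | first :: rest =>
    obtain ⟨u', i', heq, hu, hi⟩ :=
      kd_fold_inv rest (PySem.Set.union PySem.Set.empty (PySem.Set.ofList first))
        (PySem.Set.ofList first)
    have hB : kronecker_delta_alt (first :: rest) = PySem.Set.equal u' i' := by
      simp only [kronecker_delta_alt, List.foldl_cons]
      have hstep : kd_step (PySem.Set.empty, none) first
          = (PySem.Set.union PySem.Set.empty (PySem.Set.ofList first),
             some (PySem.Set.ofList first)) := rfl
      rw [hstep, heq]
    rw [hB]
    have hA : kronecker_delta (first :: rest)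
        = (first :: rest).all
            (fun l => PySem.Set.equal (PySem.Set.ofList l) (PySem.Set.ofList first)) := by
      simp [kronecker_delta, loop_eq_all]
    rw [hA]
    rw [Bool.eq_iff_iff]
    simp only [List.all_eq_true, PySem.Set.equal_iff, PySem.Set.mem_ofList]
    constructor
    · intro h x
      rw [hu x, hi x]
      simp only [PySem.Set.mem_union, PySem.Set.mem_ofList]
      constructor
      · rintro (hx | ⟨l, hl, hxl⟩)
        · rcases hx with hx | hx
          · simp [PySem.Set.empty] at hx
          · exact ⟨hx, fun l hl => (h l (List.mem_cons_of_mem _ hl) x).mpr hx⟩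
        · have hxf := (h l (List.mem_cons_of_mem _ hl) x).mp hxl
          exact ⟨hxf, fun l' hl' => (h l' (List.mem_cons_of_mem _ hl') x).mpr hxf⟩
      · rintro ⟨hxf, _⟩
        exact Or.inl (Or.inr hxf)
    · intro h l hl x
      rcases List.mem_cons.mp hl with rfl | hl
      · rfl
      constructor
      · intro hxl
        have := (h x).mp (by
          rw [hu x]; exact Or.inr ⟨l, hl, hxl⟩)
        rw [hi x] at this
        exact (PySem.List.mem_dedup _ _).mp this.1
      · intro hxf
        have := (h x).mp (by
          rw [hu x]
          simp only [PySem.Set.mem_union, PySem.Set.mem_ofList]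
          exact Or.inl (Or.inr hxf))
        rw [hi x] at this
        exact this.2 l hl
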